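-- pv_equiv track=rewrite | github.com/sreevarshan-xenoz/xencode | xencode/warp_ui_components.py | _get_file_style
-- ===== SOURCE A (Python) =====
-- def _get_file_style(filename: str, permissions: str = "") -> str:
--     """Get appropriate style for file based on type"""
--     if permissions.startswith('d'):
--         return "blue bold"  # Directory
--     elif permissions and permissions[3] == 'x':
--         return "green bold"  # Executable
--     elif filename.startswith('.'):
--         return "dim"  # Hidden file
--     elif any(filename.endswith(ext) for ext in ['.py', '.js', '.ts', '.java', '.cpp', '.c']):
--         return "cyan"  # Code file
--     elif any(filename.endswith(ext) for ext in ['.txt', '.md', '.rst', '.doc']):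
--         return "yellow"  # Document
--     elif any(filename.endswith(ext) for ext in ['.jpg', '.png', '.gif', '.svg']):
--         return "magenta"  # Image
--     else:
--         return "white"  # Default
-- ===== SOURCE B (Python) =====
-- # Alternative: one backward scan finds the last dot, then a single dict lookup on the
-- # extension replaces A's three sequential any(...endswith...) scans.
-- _EXT_STYLE = {
--     '.py': 'cyan', '.js': 'cyan', '.ts': 'cyan', '.java': 'cyan', '.cpp': 'cyan', '.c': 'cyan',
--     '.txt': 'yellow', '.md': 'yellow', '.rst': 'yellow', '.doc': 'yellow',
--     '.jpg': 'magenta', '.png': 'magenta', '.gif': 'magenta', '.svg': 'magenta',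
-- }
--
--
-- def _get_file_style(filename: str, permissions: str = "") -> str:
--     if permissions.startswith('d'):
--         return "blue bold"
--     if permissions and permissions[3] == 'x':
--         return "green bold"
--     if filename.startswith('.'):
--         return "dim"
--     for i in range(len(filename) - 1, -1, -1):
--         if filename[i] == '.':
--             return _EXT_STYLE.get(filename[i:], "white")
--     return "white"
-- ===== Notes on version B (the rewrite author's own statement) =====
-- stated objective: alternative
-- what changed: A runs three sequential any(filename.endswith(ext)) scans over hard-coded extension lists; B extracts the extension once with a single reverse scan of the filename and returns a single lookup in a prebuilt extension-to-style dict (the three priority guards are kept as-is).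
import Mathlib
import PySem

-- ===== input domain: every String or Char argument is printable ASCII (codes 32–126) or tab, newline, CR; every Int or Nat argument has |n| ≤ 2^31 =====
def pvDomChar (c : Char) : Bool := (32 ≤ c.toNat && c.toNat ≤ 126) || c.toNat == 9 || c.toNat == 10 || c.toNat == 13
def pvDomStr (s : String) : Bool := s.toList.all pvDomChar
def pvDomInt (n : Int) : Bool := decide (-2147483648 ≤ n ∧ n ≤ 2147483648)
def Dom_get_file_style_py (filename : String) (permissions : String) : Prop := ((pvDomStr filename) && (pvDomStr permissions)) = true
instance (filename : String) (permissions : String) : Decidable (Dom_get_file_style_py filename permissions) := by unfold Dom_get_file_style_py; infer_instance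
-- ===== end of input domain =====

set_option maxRecDepth 8000
set_option maxHeartbeats 1000000


-- B replaces A's three sequential any(...endswith...) scans by one reverse scan that
-- extracts the extension and a single dict lookup (objective: alternative).

-- ===== PORT A =====
def get_file_style_py (filename : String) (permissions : String) : String :=
  if PySem.Str.startswith permissions "d" then "blue bold"
  else if permissions ≠ "" ∧ PySem.Str.pyGet? permissions 3 = some 'x' then "green bold"
  else if PySem.Str.startswith filename "." then "dim"
  else if [".py", ".js", ".ts", ".java", ".cpp", ".c"].any (fun e => PySem.Str.endswith filename e) then "cyan"
  else if [".txt", ".md", ".rst", ".doc"].any (fun e => PySem.Str.endswith filename e) then "yellow"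
  else if [".jpg", ".png", ".gif", ".svg"].any (fun e => PySem.Str.endswith filename e) then "magenta"
  else "white"

-- ===== PORT B =====
def pvExtStyle : PySem.Dict String String := PySem.Dict.mk
  [(".py", "cyan"), (".js", "cyan"), (".ts", "cyan"), (".java", "cyan"), (".cpp", "cyan"), (".c", "cyan"),
   (".txt", "yellow"), (".md", "yellow"), (".rst", "yellow"), (".doc", "yellow"),
   (".jpg", "magenta"), (".png", "magenta"), (".gif", "magenta"), (".svg", "magenta")]

-- Source B's backward index loop 'for i in range(len(filename)-1, -1, -1)', as recursion over the
-- reversed char list; ext' materialises the slice filename[i:] (same value) for the dict lookup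
def pvExtLoop : List Char → List Char → String
  | [], _ => "white"
  | c :: t, ext =>
    let ext' := c :: ext
    if c = '.' then PySem.Dict.getD pvExtStyle (String.ofList ext') "white"
    else pvExtLoop t ext'

def get_file_style_py_alt (filename : String) (permissions : String) : String :=
  if PySem.Str.startswith permissions "d" then "blue bold"
  else if permissions ≠ "" ∧ PySem.Str.pyGet? permissions 3 = some 'x' then "green bold"
  else if PySem.Str.startswith filename "." then "dim"
  else pvExtLoop filename.toList.reverse []

-- ===== PRECONDITION & SPEC =====
-- A (and B alike) evaluates permissions[3], an IndexError when permissions is a nonempty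
-- string of length below four whose first character is not the directory flag; Pre_
-- excludes exactly those inputs (both programs raise there).
def Pre_get_file_style_py (filename : String) (permissions : String) : Prop :=
  permissions = "" ∨ permissions.toList.head? = some 'd' ∨ 4 ≤ permissions.toList.length
instance (filename : String) (permissions : String) : Decidable (Pre_get_file_style_py filename permissions) := by unfold Pre_get_file_style_py; infer_instance

def pvWitness_get_file_style_py : String × String := ("a.py", "-rwxr-xr-x")

def Spec_get_file_style_py (filename : String) (permissions : String) (out : String) : Prop := out = get_file_style_py_alt filename permissions
instance (filename : String) (permissions : String) (out : String) : Decidable (Spec_get_file_style_py filename permissions out) := by unfold Spec_get_file_style_py; infer_instance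

-- ===== CLAIM (what is proved, stated in full; the proofs are below) =====
def Claim_equal_get_file_style_py : Prop := ∀ (filename : String) (permissions : String), Dom_get_file_style_py filename permissions → Pre_get_file_style_py filename permissions → Spec_get_file_style_py filename permissions (get_file_style_py filename permissions)

-- ===== LEMMAS AND PROOFS =====

-- extension of the reversed char list r: chars of r up to and including the first '.',
-- re-reversed into forward order; none if r has no dot
def pvExtP : List Char → Option (List Char)
  | [] => none
  | c :: t => if c = '.' then some ['.'] else (pvExtP t).map (fun e => e ++ [c])

lemma pvExtLoop_eq (r ext : List Char) :
    pvExtLoop r ext =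
      match pvExtP r with
      | none => "white"
      | some e => PySem.Dict.getD pvExtStyle (String.ofList (e ++ ext)) "white" := by
  induction r generalizing ext with
  | nil => simp [pvExtLoop, pvExtP]
  | cons c t ih =>
    by_cases hc : c = '.'
    · subst hc; simp [pvExtLoop, pvExtP]
    · simp only [pvExtLoop, pvExtP, if_neg hc, ih (c :: ext)]
      cases pvExtP t with
      | none => simp
      | some e => simp

lemma pvKey (p : List Char) (hp : ∀ c ∈ p, c ≠ '.') :
    ∀ r : List Char, ((p ++ ['.']) <+: r ↔ pvExtP r = some ('.' :: p.reverse)) := by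
  induction p with
  | nil =>
    intro r
    cases r with
    | nil => simp [pvExtP]
    | cons c t =>
      by_cases hc : c = '.'
      · subst hc; simp [pvExtP]
      · simp only [pvExtP, if_neg hc, List.nil_append, List.reverse_nil]
        constructor
        · intro h
          rcases List.cons_prefix_cons.mp h with ⟨h1, _⟩
          exact absurd h1.symm hc
        · intro h
          rcases Option.map_eq_some_iff.mp h with ⟨e, _, he⟩
          rcases e with _ | ⟨x, e'⟩
          · simp at he; exact absurd he hc
          · simp at he
  | cons a p' ih =>
    intro r
    have ha : a ≠ '.' := hp a (by simp)
    have hp' : ∀ c ∈ p', c ≠ '.' := fun c hc => hp c (by simp [hc])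
    cases r with
    | nil => simp [pvExtP]
    | cons c t =>
      by_cases hc : c = '.'
      · subst hc
        simp only [pvExtP]
        constructor
        · intro h
          rcases List.cons_prefix_cons.mp h with ⟨h1, _⟩
          exact absurd h1 ha
        · intro h
          simp at h
      · simp only [pvExtP, if_neg hc, List.cons_append, List.cons_prefix_cons,
          List.reverse_cons]
        rw [ih hp' t]
        constructor
        · rintro ⟨rfl, h2⟩
          simp [h2]
        · intro h
          rcases Option.map_eq_some_iff.mp h with ⟨e, he, heq⟩
          have heq' : e ++ [c] = ('.' :: p'.reverse) ++ [a] := by simpa using heq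
          have h12 := List.append_inj' heq' rfl
          rcases h12 with ⟨h1, h2⟩
          simp at h2
          exact ⟨h2.symm, by rw [he, h1]⟩

lemma pv_ends (filename ext : String) (p : List Char)
    (h1 : ext.toList = '.' :: p.reverse) (hp : ∀ c ∈ p, c ≠ '.') :
    PySem.Str.endswith filename ext =
      decide (pvExtP filename.toList.reverse = some ext.toList) := by
  rw [Bool.eq_iff_iff]
  simp only [decide_eq_true_eq]
  rw [PySem.Str.endswith_eq, PySem.Chars.endswith_iff, ← List.reverse_prefix]
  have hrev : ext.toList.reverse = p ++ ['.'] := by rw [h1]; simp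
  rw [hrev, pvKey p hp, h1]

lemma pv_beq_ofList_false (s : String) (e : List Char) (h : e ≠ s.toList) :
    (s == String.ofList e) = false := by
  apply beq_eq_false_iff_ne.mpr
  intro hEq
  have h2 := congrArg String.toList hEq
  rw [String.toList_ofList] at h2
  exact h h2.symm

lemma pv_core (filename : String) :
    (if [".py", ".js", ".ts", ".java", ".cpp", ".c"].any (fun e => PySem.Str.endswith filename e) then "cyan"
     else if [".txt", ".md", ".rst", ".doc"].any (fun e => PySem.Str.endswith filename e) then "yellow"
     else if [".jpg", ".png", ".gif", ".svg"].any (fun e => PySem.Str.endswith filename e) then "magenta"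
     else "white") = pvExtLoop filename.toList.reverse [] := by
  rw [pvExtLoop_eq]
  have e1 := pv_ends filename ".py" ['y', 'p'] (by decide) (by simp)
  have e2 := pv_ends filename ".js" ['s', 'j'] (by decide) (by simp)
  have e3 := pv_ends filename ".ts" ['s', 't'] (by decide) (by simp)
  have e4 := pv_ends filename ".java" ['a', 'v', 'a', 'j'] (by decide) (by simp)
  have e5 := pv_ends filename ".cpp" ['p', 'p', 'c'] (by decide) (by simp)
  have e6 := pv_ends filename ".c" ['c'] (by decide) (by simp)
  have e7 := pv_ends filename ".txt" ['t', 'x', 't'] (by decide) (by simp)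
  have e8 := pv_ends filename ".md" ['d', 'm'] (by decide) (by simp)
  have e9 := pv_ends filename ".rst" ['t', 's', 'r'] (by decide) (by simp)
  have e10 := pv_ends filename ".doc" ['c', 'o', 'd'] (by decide) (by simp)
  have e11 := pv_ends filename ".jpg" ['g', 'p', 'j'] (by decide) (by simp)
  have e12 := pv_ends filename ".png" ['g', 'n', 'p'] (by decide) (by simp)
  have e13 := pv_ends filename ".gif" ['f', 'i', 'g'] (by decide) (by simp)
  have e14 := pv_ends filename ".svg" ['g', 'v', 's'] (by decide) (by simp)
  simp only [List.any_cons, List.any_nil, e1, e2, e3, e4, e5, e6, e7, e8, e9, e10,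
    e11, e12, e13, e14, Bool.or_false, Bool.or_eq_true, decide_eq_true_eq]
  cases h : pvExtP filename.toList.reverse with
  | none => simp
  | some ext =>
    simp only [Option.some.injEq, List.append_nil]
    by_cases k1 : ext = ".py".toList
    · subst k1; decide
    by_cases k2 : ext = ".js".toList
    · subst k2; decide
    by_cases k3 : ext = ".ts".toList
    · subst k3; decide
    by_cases k4 : ext = ".java".toList
    · subst k4; decide
    by_cases k5 : ext = ".cpp".toList
    · subst k5; decide
    by_cases k6 : ext = ".c".toList
    · subst k6; decide
    by_cases k7 : ext = ".txt".toList
    · subst k7; decide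
    by_cases k8 : ext = ".md".toList
    · subst k8; decide
    by_cases k9 : ext = ".rst".toList
    · subst k9; decide
    by_cases k10 : ext = ".doc".toList
    · subst k10; decide
    by_cases k11 : ext = ".jpg".toList
    · subst k11; decide
    by_cases k12 : ext = ".png".toList
    · subst k12; decide
    by_cases k13 : ext = ".gif".toList
    · subst k13; decide
    by_cases k14 : ext = ".svg".toList
    · subst k14; decide
    rw [if_neg (fun h => by tauto), if_neg (fun h => by tauto), if_neg (fun h => by tauto)]
    simp [pvExtStyle, PySem.Dict.getD, PySem.Dict.get?,
      pv_beq_ofList_false _ _ k1, pv_beq_ofList_false _ _ k2, pv_beq_ofList_false _ _ k3,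
      pv_beq_ofList_false _ _ k4, pv_beq_ofList_false _ _ k5, pv_beq_ofList_false _ _ k6,
      pv_beq_ofList_false _ _ k7, pv_beq_ofList_false _ _ k8, pv_beq_ofList_false _ _ k9,
      pv_beq_ofList_false _ _ k10, pv_beq_ofList_false _ _ k11, pv_beq_ofList_false _ _ k12,
      pv_beq_ofList_false _ _ k13, pv_beq_ofList_false _ _ k14]

-- ===== VERDICT (by name: the statement is the Claim_ definition above) =====
theorem get_file_style_py_spec : Claim_equal_get_file_style_py := by
  intro filename permissions _ _
  unfold Spec_get_file_style_py get_file_style_py get_file_style_py_alt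
  by_cases g1 : PySem.Str.startswith permissions "d" = true
  · rw [if_pos g1, if_pos g1]
  rw [if_neg g1, if_neg g1]
  by_cases g2 : permissions ≠ "" ∧ PySem.Str.pyGet? permissions 3 = some 'x'
  · rw [if_pos g2, if_pos g2]
  rw [if_neg g2, if_neg g2]
  by_cases g3 : PySem.Str.startswith filename "." = true
  · rw [if_pos g3, if_pos g3]
  rw [if_neg g3, if_neg g3]
  exact pv_core filename
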